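-- pv_equiv track=rewrite | github.com/ksXV/aoc-2022 | day-6/main.py | checkForSignal
-- ===== SOURCE A (Python) =====
-- def checkForSignal(charToInsert: str, chars: list):
--     amountOfCharsRead = {}
--     for char in chars:
--         if amountOfCharsRead.get(char):
--             amountOfCharsRead[char] += 1
--         else:
--             amountOfCharsRead[char] = 1
--     for char in amountOfCharsRead.values():
--         if char > 1:
--             chars.pop(0)
--             chars.append(charToInsert)
--             return False
--     return True
-- ===== SOURCE B (Python) =====
-- def checkForSignal(charToInsert: str, chars: list):
--     # Single early-exiting pass with a seen-set; return value equivalence only —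
--     # the in-place mutation (pop(0)+append) happens exactly when A's does (a duplicate exists).
--     seen = set()
--     for char in chars:
--         if char in seen:
--             chars.pop(0)
--             chars.append(charToInsert)
--             return False
--         seen.add(char)
--     return True
-- ===== Notes on version B (the rewrite author's own statement) =====
-- stated objective: simpler
-- what changed: Replaced the two-pass build-a-frequency-dict-then-scan-its-values strategy with a single pass over the characters that maintains a seen set and exits at the first repeat.
import Mathlib
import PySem

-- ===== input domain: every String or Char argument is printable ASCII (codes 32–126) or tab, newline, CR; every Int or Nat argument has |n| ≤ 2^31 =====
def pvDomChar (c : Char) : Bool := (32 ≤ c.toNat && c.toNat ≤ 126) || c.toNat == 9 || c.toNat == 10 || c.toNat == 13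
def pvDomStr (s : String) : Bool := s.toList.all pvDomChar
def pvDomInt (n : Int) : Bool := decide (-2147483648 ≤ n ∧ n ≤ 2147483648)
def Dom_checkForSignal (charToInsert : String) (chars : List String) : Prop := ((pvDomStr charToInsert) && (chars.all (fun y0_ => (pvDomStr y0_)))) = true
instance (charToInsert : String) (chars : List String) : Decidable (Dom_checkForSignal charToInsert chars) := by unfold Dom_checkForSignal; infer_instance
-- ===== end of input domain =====

-- B replaces A's two passes (build a full frequency dict, then scan its values) with one
-- early-exiting pass over the chars keeping a seen set (objective: simpler). Equivalence is
-- about the RETURN value; both Pythons mutate `chars` (pop(0)+append) exactly when a duplicate exists.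

-- ===== PORT A =====
def checkForSignal (charToInsert : String) (chars : List String) : Bool :=
  -- first loop: build the count dict (d.get(char) is truthy iff present with nonzero count)
  let amountOfCharsRead : PySem.Dict String Int :=
    chars.foldl (fun d char =>
      if d.getD char 0 ≠ 0 then d.insert char (d.getD char 0 + 1)
      else d.insert char 1) PySem.Dict.empty
  -- second loop: scan the values, return False at the first one > 1 (the mutation is a side effect only)
  if amountOfCharsRead.values.any (fun v => v > 1) then false else true

-- ===== PORT B =====
def checkForSignalAltGo (seen : PySem.Set String) : List String → Bool
  | [] => true
  | char :: rest =>
      if PySem.Set.contains seen char then false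
      else checkForSignalAltGo (PySem.Set.add seen char) rest

def checkForSignal_alt (charToInsert : String) (chars : List String) : Bool :=
  checkForSignalAltGo PySem.Set.empty chars

-- ===== PRECONDITION & SPEC =====
def Spec_checkForSignal (charToInsert : String) (chars : List String) (out : Bool) : Prop := out = checkForSignal_alt charToInsert chars
instance (charToInsert : String) (chars : List String) (out : Bool) : Decidable (Spec_checkForSignal charToInsert chars out) := by unfold Spec_checkForSignal; infer_instance

-- ===== CLAIM (what is proved, stated in full; the proofs are below) =====
def Claim_equal_checkForSignal : Prop := ∀ (charToInsert : String) (chars : List String), Dom_checkForSignal charToInsert chars → Spec_checkForSignal charToInsert chars (checkForSignal charToInsert chars)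

-- ===== LEMMAS AND PROOFS =====

-- A's branchy counting fold is the counter fold (in the else branch the old count is 0).
theorem checkForSignal_fold_eq :
    (fun (d : PySem.Dict String Int) char =>
      if d.getD char 0 ≠ 0 then d.insert char (d.getD char 0 + 1)
      else d.insert char 1)
    = fun d char => d.insert char (d.getD char 0 + 1) := by
  funext d char
  split_ifs with h
  · rfl
  · simp only [ne_eq, not_not] at h
    rw [h]
    norm_num

theorem checkForSignal_eq_nodup (charToInsert : String) (chars : List String) :
    checkForSignal charToInsert chars = decide chars.Nodup := by
  unfold checkForSignal
  rw [checkForSignal_fold_eq, PySem.Dict.foldl_insert_getD_add_one_eq_counter]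
  simp only [PySem.Dict.values, PySem.Dict.items_counter, List.map_map, List.any_map,
    Function.comp_def]
  rcases h : decide chars.Nodup with _ | _
  · simp only [decide_eq_false_iff_not, List.nodup_iff_count_le_one, not_forall, not_le] at h
    obtain ⟨a, ha⟩ := h
    have hmem : a ∈ PySem.Set.ofList chars := by
      rw [PySem.Set.mem_ofList]
      exact List.count_pos_iff.mp (by omega)
    have hany : (PySem.Set.ofList chars).any (fun x => decide ((1:Int) < chars.count x)) = true := by
      rw [List.any_eq_true]
      exact ⟨a, hmem, by simp; exact_mod_cast ha⟩
    rw [hany]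
    rfl
  · rw [decide_eq_true_iff, List.nodup_iff_count_le_one] at h
    have hany : (PySem.Set.ofList chars).any (fun x => decide ((1:Int) < chars.count x)) = false := by
      rw [List.any_eq_false]
      intro x hx
      simp only [decide_eq_true_eq, not_lt]
      exact_mod_cast h x
    rw [hany]
    rfl

theorem checkForSignalAltGo_eq (l : List String) :
    ∀ (seen : PySem.Set String),
      checkForSignalAltGo seen l = decide (l.Nodup ∧ ∀ c ∈ l, c ∉ seen) := by
  induction l with
  | nil => intro seen; simp [checkForSignalAltGo]
  | cons c rest ih =>
    intro seen
    unfold checkForSignalAltGo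
    by_cases hc : c ∈ seen
    · rw [(PySem.Set.contains_iff seen c).mpr hc]
      simp [hc]
    · have hcont : PySem.Set.contains seen c = false := by
        rcases hcc : PySem.Set.contains seen c with _ | _
        · rfl
        · exact absurd ((PySem.Set.contains_iff seen c).mp hcc) hc
      rw [hcont, if_neg (by simp), ih]
      congr 1
      simp only [List.nodup_cons, List.mem_cons, PySem.Set.mem_add, eq_iff_iff, not_or]
      constructor
      · rintro ⟨hnd, hall⟩
        exact ⟨⟨fun hmem => (hall c hmem).2 rfl, hnd⟩,
          fun x hx => hx.elim (fun h => h ▸ hc) (fun h => (hall x h).1)⟩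
      · rintro ⟨⟨hcr, hnd⟩, hall⟩
        exact ⟨hnd, fun x hx => ⟨hall x (Or.inr hx), fun he => hcr (he ▸ hx)⟩⟩

theorem checkForSignal_alt_eq_nodup (charToInsert : String) (chars : List String) :
    checkForSignal_alt charToInsert chars = decide chars.Nodup := by
  unfold checkForSignal_alt
  rw [checkForSignalAltGo_eq]
  congr 1
  simp [PySem.Set.empty]

-- ===== VERDICT (by name: the statement is the Claim_ definition above) =====
theorem checkForSignal_spec : Claim_equal_checkForSignal := by
  intro charToInsert chars _
  unfold Spec_checkForSignal
  rw [checkForSignal_eq_nodup, checkForSignal_alt_eq_nodup]
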